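-- pv_equiv track=rewrite | github.com/BenSeamons/WBB | csh_blood_model_final.py | withdraw_from_queue
-- ===== SOURCE A (Python) =====
-- def withdraw_from_queue(queue, needed):
--     withdrawn = 0
--     new_queue = []
--     for age, qty in queue:
--         if withdrawn >= needed:
--             new_queue.append([age, qty])
--         else:
--             take = min(qty, needed - withdrawn)
--             withdrawn += take
--             if qty > take:
--                 new_queue.append([age, qty - take])
--     return new_queue, withdrawn
-- ===== SOURCE B (Python) =====
-- def _rows(items):
--     return [[age, qty] for age, qty in items]
--
-- def withdraw_from_queue(queue, needed):
--     # Prefix-sum decomposition: withdrawn while active equals min(prefix, needed),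
--     # so find the first split index where the running quantity sum reaches `needed`.
--     if needed <= 0:
--         return _rows(queue), 0
--     prefix = 0
--     for i, (age, qty) in enumerate(queue):
--         prefix += qty
--         if prefix >= needed:
--             head = [[age, prefix - needed]] if prefix > needed else []
--             return head + _rows(queue[i + 1:]), needed
--     return [], prefix
-- ===== Notes on version B (the rewrite author's own statement) =====
-- stated objective: alternative
-- what changed: Replaces A's interleaved running-withdrawn branch with a prefix-sum split: find the first index where the cumulative quantity reaches `needed`, emit the overshoot remainder there, and copy the tail; elements before the split are never materialised.
import Mathlib
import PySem

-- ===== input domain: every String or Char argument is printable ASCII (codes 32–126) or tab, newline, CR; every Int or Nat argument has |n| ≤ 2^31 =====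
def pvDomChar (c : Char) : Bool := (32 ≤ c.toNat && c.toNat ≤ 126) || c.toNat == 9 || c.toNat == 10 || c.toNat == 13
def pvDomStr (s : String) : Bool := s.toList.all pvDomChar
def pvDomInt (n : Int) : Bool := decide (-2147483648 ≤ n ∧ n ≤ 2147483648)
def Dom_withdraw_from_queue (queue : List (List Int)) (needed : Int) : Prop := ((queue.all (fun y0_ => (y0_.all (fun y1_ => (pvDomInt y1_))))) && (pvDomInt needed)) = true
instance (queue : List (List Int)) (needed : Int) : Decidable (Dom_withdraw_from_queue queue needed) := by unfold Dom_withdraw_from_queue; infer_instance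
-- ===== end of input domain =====

-- B replaces A's interleaved running-withdrawn loop with a pfx-sum split-point scan (alternative decomposition, same cost).

-- ===== PORT A =====
-- A's loop body; state = (withdrawn, new_queue). Rows not of length 2 raise in Python (excluded by Pre_).
def aStep (needed : Int) (acc : Int × List (List Int)) (item : List Int) : Int × List (List Int) :=
  match item with
  | [age, qty] =>
    if acc.1 ≥ needed then (acc.1, acc.2 ++ [[age, qty]])
    else
      let take := min qty (needed - acc.1)
      let withdrawn := acc.1 + take
      if qty > take then (withdrawn, acc.2 ++ [[age, qty - take]])
      else (withdrawn, acc.2)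
  | _ => acc

def withdraw_from_queue (queue : List (List Int)) (needed : Int) : List (List Int) × Int :=
  let st := queue.foldl (aStep needed) (0, [])
  (st.2, st.1)

-- ===== PORT B =====
-- Source B's _rows helper: rebuild each [age, qty] row.
def bRows (items : List (List Int)) : List (List Int) :=
  items.map (fun x => match x with | [age, qty] => [age, qty] | _ => x)

-- Source B's scan: running pfx; at the first index where pfx ≥ needed, emit head ++ copied tail.
def bLoop (needed : Int) : List (List Int) → Int → List (List Int) × Int
  | [], pfx => ([], pfx)
  | x :: rest, pfx =>
    match x with
    | [age, qty] =>
      let p := pfx + qty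
      if p ≥ needed then
        ((if p > needed then [[age, p - needed]] else []) ++ bRows rest, needed)
      else bLoop needed rest p
    | _ => bLoop needed rest pfx

def withdraw_from_queue_alt (queue : List (List Int)) (needed : Int) : List (List Int) × Int :=
  if needed ≤ 0 then (bRows queue, 0) else bLoop needed queue 0

-- ===== PRECONDITION & SPEC =====
-- Pre_ excludes rows that are not exactly [age, qty] pairs: Python's tuple unpacking raises ValueError there.
def Pre_withdraw_from_queue (queue : List (List Int)) (needed : Int) : Prop :=
  ∀ x ∈ queue, x.length = 2

instance (queue : List (List Int)) (needed : Int) : Decidable (Pre_withdraw_from_queue queue needed) := by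
  unfold Pre_withdraw_from_queue; infer_instance

def pvWitness_withdraw_from_queue : List (List Int) × Int := ([[1, 5], [2, 3]], 4)

def Spec_withdraw_from_queue (queue : List (List Int)) (needed : Int) (out : List (List Int) × Int) : Prop := out = withdraw_from_queue_alt queue needed
instance (queue : List (List Int)) (needed : Int) (out : List (List Int) × Int) : Decidable (Spec_withdraw_from_queue queue needed out) := by unfold Spec_withdraw_from_queue; infer_instance

-- ===== CLAIM (what is proved, stated in full; the proofs are below) =====
def Claim_equal_withdraw_from_queue : Prop := ∀ (queue : List (List Int)) (needed : Int), Dom_withdraw_from_queue queue needed → Pre_withdraw_from_queue queue needed → Spec_withdraw_from_queue queue needed (withdraw_from_queue queue needed)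

-- ===== LEMMAS AND PROOFS =====

theorem len2_pair (x : List Int) (h : x.length = 2) : ∃ a b, x = [a, b] := by
  match x, h with
  | [a, b], _ => exact ⟨a, b, rfl⟩

-- Once withdrawn ≥ needed, A's loop copies every remaining row.
theorem foldA_locked (needed w : Int) (acc : List (List Int)) (queue : List (List Int))
    (hw : needed ≤ w) (hp : ∀ x ∈ queue, x.length = 2) :
    queue.foldl (aStep needed) (w, acc) = (w, acc ++ bRows queue) := by
  induction queue generalizing acc with
  | nil => simp [bRows]
  | cons x rest ih =>
    obtain ⟨a, b, rfl⟩ := len2_pair x (hp x (by simp))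
    have h1 : ∀ y ∈ rest, y.length = 2 := fun y hy => hp y (by simp [hy])
    simp only [List.foldl_cons, aStep, if_pos hw]
    rw [ih _ h1]
    simp [bRows]

-- While withdrawn < needed, A's state tracks B's pfx scan.
theorem foldA_active (needed : Int) (queue : List (List Int)) :
    ∀ (w : Int) (acc : List (List Int)), w < needed → (∀ x ∈ queue, x.length = 2) →
    queue.foldl (aStep needed) (w, acc) =
      ((bLoop needed queue w).2, acc ++ (bLoop needed queue w).1) := by
  induction queue with
  | nil => intro w acc _ _; simp [bLoop]
  | cons x rest ih =>
    intro w acc hw hp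
    obtain ⟨a, b, rfl⟩ := len2_pair x (hp x (by simp))
    have h1 : ∀ y ∈ rest, y.length = 2 := fun y hy => hp y (by simp [hy])
    by_cases hlock : w + b ≥ needed
    · have htake : min b (needed - w) = needed - w := by omega
      simp only [List.foldl_cons, aStep, if_neg (not_le.mpr hw), htake]
      have hwd : w + (needed - w) = needed := by omega
      by_cases hover : w + b > needed
      · rw [if_pos (by omega : b > needed - w), hwd,
            foldA_locked needed needed _ rest le_rfl h1]
        simp only [bLoop, if_pos hlock, if_pos hover]
        have : b - (needed - w) = w + b - needed := by ring
        simp [this, List.append_assoc]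
      · rw [if_neg (by omega : ¬ b > needed - w), hwd,
            foldA_locked needed needed _ rest le_rfl h1]
        simp [bLoop, if_pos hlock, if_neg hover]
    · have htake : min b (needed - w) = b := by omega
      simp only [List.foldl_cons, aStep, if_neg (not_le.mpr hw), htake,
        if_neg (by omega : ¬ b > b)]
      rw [ih (w + b) acc (by omega) h1]
      simp [bLoop, if_neg hlock]

-- ===== VERDICT (by name: the statement is the Claim_ definition above) =====
theorem withdraw_from_queue_spec : Claim_equal_withdraw_from_queue := by
  intro queue needed _ hpre
  unfold Spec_withdraw_from_queue withdraw_from_queue withdraw_from_queue_alt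
  by_cases h0 : needed ≤ 0
  · rw [foldA_locked needed 0 [] queue h0 hpre]
    simp [h0]
  · rw [foldA_active needed queue 0 [] (by omega) hpre]
    simp [h0]
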